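-- pv_equiv track=rewrite | github.com/epoyraz/leetcode | solutions/1562.py | peopleIndexes
-- ===== SOURCE A (Python) =====
-- def peopleIndexes(favoriteCompanies):
--     n = len(favoriteCompanies)
--     sets = [set(lst) for lst in favoriteCompanies]
--     res = []
--     for i, s_i in enumerate(sets):
--         is_subset = False
--         for j, s_j in enumerate(sets):
--             if i == j or len(s_i) > len(s_j):
--                 continue
--             if s_i.issubset(s_j):
--                 is_subset = True
--                 break
--         if not is_subset:
--             res.append(i)
--     return res
-- ===== SOURCE B (Python) =====
-- def peopleIndexes(favoriteCompanies):
--     sets = [set(lst) for lst in favoriteCompanies]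
--     buckets = {}
--     for idx, s in enumerate(sets):
--         buckets[len(s)] = buckets.get(len(s), []) + [idx]
--     res = []
--     for i, s_i in enumerate(sets):
--         k = len(s_i)
--         dominated = False
--         for length, idxs in buckets.items():
--             if length < k:
--                 continue
--             for j in idxs:
--                 if j != i and s_i.issubset(sets[j]):
--                     dominated = True
--                     break
--             if dominated:
--                 break
--         if not dominated:
--             res.append(i)
--     return res
-- ===== Notes on version B (the rewrite author's own statement) =====
-- stated objective: alternative
-- what changed: B builds a dict bucketing set indices by set size in one pass, then for each set scans only the buckets of size >= its own (including the equal-size bucket, excluding self) instead of A's flat inner scan over all sets with a length guard.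
import Mathlib
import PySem

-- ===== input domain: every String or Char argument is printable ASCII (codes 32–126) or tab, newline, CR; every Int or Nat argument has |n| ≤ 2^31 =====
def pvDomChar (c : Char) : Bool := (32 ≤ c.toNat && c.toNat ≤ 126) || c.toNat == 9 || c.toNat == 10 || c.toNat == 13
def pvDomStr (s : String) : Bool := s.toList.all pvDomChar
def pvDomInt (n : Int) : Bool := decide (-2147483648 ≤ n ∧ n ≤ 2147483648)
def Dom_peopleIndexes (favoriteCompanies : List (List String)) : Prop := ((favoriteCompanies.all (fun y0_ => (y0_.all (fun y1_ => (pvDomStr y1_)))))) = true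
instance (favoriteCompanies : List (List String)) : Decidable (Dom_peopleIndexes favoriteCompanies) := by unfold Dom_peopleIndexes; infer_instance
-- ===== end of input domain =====

-- B replaces A's inner scan over all sets by a dict bucketing indices by set size, scanning only buckets of size ≥ |s_i|; objective: alternative decomposition.


-- ===== PORT A =====
def peopleIndexes (favoriteCompanies : List (List String)) : List Int :=
  let sets : List (PySem.Set String) := favoriteCompanies.map (fun lst => PySem.Set.ofList lst)
  (PySem.List.enumerate sets).foldl (fun res p =>
    let is_subset := (PySem.List.enumerate sets).any (fun q =>
      if p.1 = q.1 ∨ PySem.Set.len p.2 > PySem.Set.len q.2 then false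
      else PySem.Set.issubset p.2 q.2)
    if is_subset then res else res ++ [p.1]) []

-- ===== PORT B =====
-- the length-indexed buckets dict of Source B: buckets[len(s)] = buckets.get(len(s), []) + [idx]
def pvBuckets (sets : List (PySem.Set String)) : PySem.Dict Int (List Int) :=
  ((PySem.List.enumerate sets).map (fun p => (PySem.Set.len p.2, p.1))).foldl
    (fun d p => d.modify p.1 [] (fun v => v ++ [p.2])) PySem.Dict.empty

def peopleIndexes_alt (favoriteCompanies : List (List String)) : List Int :=
  let sets : List (PySem.Set String) := favoriteCompanies.map (fun lst => PySem.Set.ofList lst)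
  let buckets := pvBuckets sets
  (PySem.List.enumerate sets).foldl (fun res p =>
    let dominated := buckets.items.any (fun q =>
      if q.1 < PySem.Set.len p.2 then false
      else q.2.any (fun j => (j != p.1) && PySem.Set.issubset p.2 (PySem.List.pyGetD sets j [])))
    if dominated then res else res ++ [p.1]) []

-- ===== PRECONDITION & SPEC =====
def Spec_peopleIndexes (favoriteCompanies : List (List String)) (out : List Int) : Prop := out = peopleIndexes_alt favoriteCompanies
instance (favoriteCompanies : List (List String)) (out : List Int) : Decidable (Spec_peopleIndexes favoriteCompanies out) := by unfold Spec_peopleIndexes; infer_instance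

-- ===== CLAIM (what is proved, stated in full; the proofs are below) =====
def Claim_equal_peopleIndexes : Prop := ∀ (favoriteCompanies : List (List String)), Dom_peopleIndexes favoriteCompanies → Spec_peopleIndexes favoriteCompanies (peopleIndexes favoriteCompanies)

-- ===== LEMMAS AND PROOFS =====

lemma pvBuckets_getD (sets : List (PySem.Set String)) (L : Int) :
    (pvBuckets sets).getD L [] =
      ((((PySem.List.enumerate sets).map (fun p => (PySem.Set.len p.2, p.1))).filter
        (fun p => p.1 == L)).map (fun p => p.2)) := by
  unfold pvBuckets
  rw [PySem.Dict.getD_foldl_modify_append]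
  simp

lemma pvBuckets_keys (sets : List (PySem.Set String)) :
    (pvBuckets sets).keys =
      PySem.Set.ofList ((PySem.List.enumerate sets).map (fun p => PySem.Set.len p.2)) := by
  unfold pvBuckets
  refine Eq.trans (PySem.Dict.keys_foldl_modify_key
      ((PySem.List.enumerate sets).map (fun p => (PySem.Set.len p.2, p.1)))
      (fun p : Int × Int => p.1) [] (fun _ p v => v ++ [p.2]) PySem.Dict.empty) ?_
  simp [PySem.Dict.keys_empty, PySem.Set.update_nil_left, List.map_map, Function.comp_def, PySem.Set.len]

lemma pvBuckets_nodup_keys (sets : List (PySem.Set String)) :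
    (pvBuckets sets).keys.Nodup := by
  unfold pvBuckets
  exact PySem.Dict.nodup_keys_foldl_modify_key
      ((PySem.List.enumerate sets).map (fun p => (PySem.Set.len p.2, p.1)))
      (fun p : Int × Int => p.1) [] (fun _ p v => v ++ [p.2]) PySem.Dict.empty
      (by simp)

lemma pvBuckets_mem_items (sets : List (PySem.Set String)) (q : Int × List Int) :
    q ∈ (pvBuckets sets).items ↔
      q.1 ∈ (pvBuckets sets).keys ∧ q.2 = (pvBuckets sets).getD q.1 [] := by
  rw [PySem.Dict.items_eq_map_keys _ (pvBuckets_nodup_keys sets) []]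
  constructor
  · intro h
    rcases List.mem_map.mp h with ⟨k, hk, rfl⟩
    exact ⟨hk, rfl⟩
  · rintro ⟨h1, h2⟩
    exact List.mem_map.mpr ⟨q.1, h1, by rw [← h2]⟩

-- membership in a length bucket, read off the getD characterisation
lemma mem_bucket (sets : List (PySem.Set String)) (L : Int) (j : Int) :
    j ∈ (pvBuckets sets).getD L [] ↔
      ∃ s, (j, s) ∈ PySem.List.enumerate sets ∧ (PySem.Set.len s : Int) = L := by
  rw [pvBuckets_getD]
  simp only [List.mem_map, List.mem_filter, beq_iff_eq]
  constructor
  · rintro ⟨p, ⟨⟨⟨j1, s1⟩, hmem, heq⟩, hpL⟩, hpj⟩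
    subst heq
    simp only at hpL hpj
    subst hpj
    exact ⟨s1, hmem, hpL⟩
  · rintro ⟨s, hmem, hL⟩
    exact ⟨(PySem.Set.len s, j), ⟨⟨(j, s), hmem, rfl⟩, hL⟩, rfl⟩

-- indexing back into sets from an enumerate member
lemma pyGetD_of_mem_enumerate (sets : List (PySem.Set String)) (q : Int × PySem.Set String)
    (h : q ∈ PySem.List.enumerate sets) : PySem.List.pyGetD sets q.1 [] = q.2 := by
  rcases (PySem.List.mem_enumerate_iff _ _ _).mp h with ⟨k, hk, hq⟩
  subst hq
  simp only [zero_add]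
  rw [PySem.List.pyGetD_natCast]
  exact List.getD_eq_getElem _ _ hk

-- the crucial point-wise fact: A's inner flag equals B's bucket flag, for every (i, s_i)
lemma flag_eq (sets : List (PySem.Set String)) (i : Int) (s_i : PySem.Set String) :
    ((PySem.List.enumerate sets).any (fun q =>
        if i = q.1 ∨ PySem.Set.len s_i > PySem.Set.len q.2 then false
        else PySem.Set.issubset s_i q.2))
    = ((pvBuckets sets).items.any (fun q =>
        if q.1 < PySem.Set.len s_i then false
        else q.2.any (fun j => (j != i) && PySem.Set.issubset s_i (PySem.List.pyGetD sets j [])))) := by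
  rw [Bool.eq_iff_iff]
  simp only [List.any_eq_true]
  constructor
  · rintro ⟨q, hmemq, hflag⟩
    split_ifs at hflag with hcond
    push Not at hcond
    obtain ⟨hne, hle⟩ := hcond
    refine ⟨((PySem.Set.len q.2 : Int), (pvBuckets sets).getD (PySem.Set.len q.2) []), ?_, ?_⟩
    · rw [pvBuckets_mem_items]
      refine ⟨?_, rfl⟩
      rw [pvBuckets_keys, PySem.Set.mem_ofList]
      exact List.mem_map.mpr ⟨q, hmemq, rfl⟩
    · simp only
      rw [if_neg (by omega)]
      rw [List.any_eq_true]
      refine ⟨q.1, (mem_bucket _ _ _).mpr ⟨q.2, by simpa using hmemq, rfl⟩, ?_⟩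
      rw [pyGetD_of_mem_enumerate sets q hmemq]
      simp only [Bool.and_eq_true, bne_iff_ne]
      exact ⟨fun h => hne h.symm, hflag⟩
  · rintro ⟨⟨L, js⟩, hmem, hflag⟩
    rw [pvBuckets_mem_items] at hmem
    obtain ⟨-, hjs⟩ := hmem
    simp only at hflag hjs
    split_ifs at hflag with hL
    rw [List.any_eq_true] at hflag
    obtain ⟨j, hjmem, hj⟩ := hflag
    rw [hjs, mem_bucket] at hjmem
    obtain ⟨s_j, hmem', hlenL⟩ := hjmem
    simp only [Bool.and_eq_true, bne_iff_ne] at hj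
    have hget := pyGetD_of_mem_enumerate sets (j, s_j) hmem'
    simp only at hget
    refine ⟨(j, s_j), hmem', ?_⟩
    have hcond : ¬ (i = (j, s_j).1 ∨ PySem.Set.len s_i > PySem.Set.len (j, s_j).2) := by
      simp only
      push Not
      exact ⟨fun h => hj.1 h.symm, by omega⟩
    rw [if_neg hcond]
    rw [hget] at hj
    exact hj.2

-- ===== VERDICT (by name: the statement is the Claim_ definition above) =====
theorem peopleIndexes_spec : Claim_equal_peopleIndexes := by
  intro fc _
  unfold Spec_peopleIndexes peopleIndexes peopleIndexes_alt
  apply PySem.List.foldl_congr_mem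
  intro acc p _
  rw [flag_eq (fc.map (fun lst => PySem.Set.ofList lst)) p.1 p.2]
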